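-- pv_equiv track=rewrite | github.com/domcamp04/wk7day2_whiteboard | whiteboard.py | mean1
-- ===== SOURCE A (Python) =====
-- def mean1 (nums):
--     mins = min(nums)
--     maxs = max(nums)
--     while mins in nums:
--         nums.remove(mins)
--         while maxs in nums:
--             nums.remove(maxs)
--     avg = sum(nums) // len(nums)
--     return avg
-- ===== SOURCE B (Python) =====
-- def mean1(nums):
--     lo = min(nums)
--     hi = max(nums)
--     mid = [x for x in nums if lo < x < hi]
--     return sum(mid) // len(mid)
-- ===== Notes on version B (the rewrite author's own statement) =====
-- stated objective: simpler
-- what changed: Replaces the nested while-in/remove loops by a single comprehension keeping the elements strictly between min and max, then sum//len.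
-- outside the precondition, e.g. on mean1([]): A raises ValueError, B raises ValueError; on mean1([5, 5, 7]): A raises ZeroDivisionError, B raises ZeroDivisionError
import Mathlib
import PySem

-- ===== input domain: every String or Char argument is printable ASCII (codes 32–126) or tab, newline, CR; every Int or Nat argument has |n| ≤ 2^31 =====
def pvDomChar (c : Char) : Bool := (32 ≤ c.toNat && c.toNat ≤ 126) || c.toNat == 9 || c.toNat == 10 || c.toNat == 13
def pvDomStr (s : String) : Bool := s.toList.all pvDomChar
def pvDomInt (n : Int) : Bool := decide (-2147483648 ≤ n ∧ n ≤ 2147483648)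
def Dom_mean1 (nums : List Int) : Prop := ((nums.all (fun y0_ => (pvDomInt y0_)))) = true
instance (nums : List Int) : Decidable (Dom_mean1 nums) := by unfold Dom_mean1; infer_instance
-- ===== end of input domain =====

-- B replaces A's nested while/remove loops with one strict-bounds filter pass, then sum // len (simpler).
-- A mutates its argument list in place; the equivalence proved here is about the RETURN value only.

-- ===== PORT A =====
-- inner loop: 'while maxs in nums: nums.remove(maxs)'
def pvInner (v : Int) (l : List Int) : List Int :=
  match h : PySem.List.remove? l v with
  | some l' => pvInner v l'
  | none => l
termination_by l.length
decreasing_by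
  have hm : v ∈ l := by
    by_contra hnm
    simp [((PySem.List.remove?_eq_none_iff _ _).mpr hnm)] at h
  rw [PySem.List.remove?_eq_some_erase _ _ hm] at h
  cases h
  have := List.length_erase_of_mem hm
  have : 0 < l.length := List.length_pos_of_mem hm
  omega

-- needed by pvOuter's termination proof
theorem pvInner_length_le (v : Int) (l : List Int) : (pvInner v l).length ≤ l.length := by
  induction l using pvInner.induct v with
  | case1 l l' h ih =>
    have hm : v ∈ l := by
      by_contra hnm
      simp [((PySem.List.remove?_eq_none_iff _ _).mpr hnm)] at h
    have hstep : pvInner v l = pvInner v l' := by rw [pvInner, h]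
    rw [PySem.List.remove?_eq_some_erase _ _ hm] at h
    cases h
    rw [hstep]
    have := List.length_erase_of_mem hm
    have : 0 < l.length := List.length_pos_of_mem hm
    omega
  | case2 l h => rw [pvInner, h]

-- outer loop: 'while mins in nums: nums.remove(mins); <inner loop>'
def pvOuter (mins maxs : Int) (l : List Int) : List Int :=
  match h : PySem.List.remove? l mins with
  | some l' => pvOuter mins maxs (pvInner maxs l')
  | none => l
termination_by l.length
decreasing_by
  have hm : mins ∈ l := by
    by_contra hnm
    simp [((PySem.List.remove?_eq_none_iff _ _).mpr hnm)] at h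
  rw [PySem.List.remove?_eq_some_erase _ _ hm] at h
  cases h
  have h1 := pvInner_length_le maxs (l.erase mins)
  have := List.length_erase_of_mem hm
  have : 0 < l.length := List.length_pos_of_mem hm
  omega

def mean1 (nums : List Int) : Int :=
  match PySem.List.min? nums (fun x => x), PySem.List.max? nums (fun x => x) with
  | some mins, some maxs =>
      let rest := pvOuter mins maxs nums
      PySem.Int.floordiv rest.sum rest.length
  | _, _ => 0   -- unreachable under Pre_ (Python raises ValueError on [])

-- ===== PORT B =====
def mean1_alt (nums : List Int) : Int :=
  match PySem.List.min? nums (fun x => x) with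
  | none => 0   -- unreachable under Pre_ (Python raises ValueError on [])
  | some lo =>
    match PySem.List.max? nums (fun x => x) with
    | none => 0   -- unreachable under Pre_ (Python raises ValueError on [])
    | some hi =>
      let mid := nums.filter (fun x => decide (lo < x) && decide (x < hi))
      PySem.Int.floordiv mid.sum mid.length

-- ===== PRECONDITION & SPEC =====
-- A raises ValueError on [] and ZeroDivisionError when no element lies strictly between
-- min and max (everything gets removed); Pre_ excludes exactly those inputs (B raises there too).
def Pre_mean1 (nums : List Int) : Prop :=
  ∃ x ∈ nums, (∃ y ∈ nums, y < x) ∧ (∃ z ∈ nums, x < z)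
instance (nums : List Int) : Decidable (Pre_mean1 nums) := by unfold Pre_mean1; infer_instance

def pvWitness_mean1 : List Int := [1, 2, 3]

def Spec_mean1 (nums : List Int) (out : Int) : Prop := out = mean1_alt nums
instance (nums : List Int) (out : Int) : Decidable (Spec_mean1 nums out) := by unfold Spec_mean1; infer_instance

-- ===== CLAIM (what is proved, stated in full; the proofs are below) =====
def Claim_equal_mean1 : Prop := ∀ (nums : List Int), Dom_mean1 nums → Pre_mean1 nums → Spec_mean1 nums (mean1 nums)

-- ===== LEMMAS AND PROOFS =====

theorem pvInner_step (v : Int) (l l' : List Int) (h : PySem.List.remove? l v = some l') :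
    pvInner v l = pvInner v l' := by rw [pvInner, h]

theorem pvInner_none (v : Int) (l : List Int) (h : PySem.List.remove? l v = none) :
    pvInner v l = l := by rw [pvInner, h]

theorem pvOuter_step (mins maxs : Int) (l l' : List Int)
    (h : PySem.List.remove? l mins = some l') :
    pvOuter mins maxs l = pvOuter mins maxs (pvInner maxs l') := by rw [pvOuter, h]

theorem pvOuter_none (mins maxs : Int) (l : List Int)
    (h : PySem.List.remove? l mins = none) :
    pvOuter mins maxs l = l := by rw [pvOuter, h]

-- erasing an element the predicate rejects does not change the filter
theorem pv_filter_erase {p : Int → Bool} {v : Int} (hv : p v = false) (l : List Int) :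
    (l.erase v).filter p = l.filter p := by
  induction l with
  | nil => simp
  | cons a t ih =>
    by_cases hav : a = v
    · subst hav; simp [List.erase_cons_head, hv]
    · rw [List.erase_cons_tail (by simpa using hav)]
      simp [List.filter_cons, ih]

theorem pv_filter_absorb (a b : Int) (t : List Int) :
    (t.filter (fun x => decide (x ≠ b))).filter (fun x => decide (x ≠ a) && decide (x ≠ b))
      = t.filter (fun x => decide (x ≠ a) && decide (x ≠ b)) := by
  rw [List.filter_filter]
  congr 1
  funext x
  by_cases h1 : x = a <;> by_cases h2 : x = b <;> simp [h1, h2]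

-- the inner while loop removes every occurrence of v
theorem pvInner_eq (v : Int) (l : List Int) :
    pvInner v l = l.filter (fun x => decide (x ≠ v)) := by
  induction l using pvInner.induct v with
  | case1 l l' h ih =>
    have hm : v ∈ l := by
      by_contra hnm
      simp [((PySem.List.remove?_eq_none_iff _ _).mpr hnm)] at h
    rw [pvInner_step v l l' h, ih]
    rw [PySem.List.remove?_eq_some_erase _ _ hm] at h
    cases h
    rw [pv_filter_erase (by simp) l]
  | case2 l h =>
    have hnm : v ∉ l := (PySem.List.remove?_eq_none_iff _ _).mp h
    rw [pvInner_none v l h, Eq.comm, List.filter_eq_self]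
    intro a ha
    simp
    exact fun hav => hnm (hav ▸ ha)

-- the outer loop removes every occurrence of mins and maxs (given mins is present)
theorem pvOuter_eq (mins maxs : Int) (l : List Int) (hm : mins ∈ l) :
    pvOuter mins maxs l = l.filter (fun x => decide (x ≠ mins) && decide (x ≠ maxs)) := by
  induction l using pvOuter.induct mins maxs with
  | case1 l l' h ih =>
    rw [pvOuter_step mins maxs l l' h]
    rw [PySem.List.remove?_eq_some_erase _ _ hm] at h
    cases h
    rw [pvInner_eq] at ih ⊢
    set l₂ := (l.erase mins).filter (fun x => decide (x ≠ maxs)) with hl₂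
    by_cases hm2 : mins ∈ l₂
    · rw [ih hm2, hl₂, pv_filter_absorb, pv_filter_erase (by simp) l]
    · rw [pvOuter_none mins maxs l₂ ((PySem.List.remove?_eq_none_iff _ _).mpr hm2)]
      have h1 : l₂.filter (fun x => decide (x ≠ mins)) = l₂ := by
        rw [List.filter_eq_self]
        intro a ha
        simp
        exact fun hav => hm2 (hav ▸ ha)
      calc l₂ = l₂.filter (fun x => decide (x ≠ mins)) := h1.symm
        _ = (l.erase mins).filter (fun x => decide (x ≠ mins) && decide (x ≠ maxs)) := by
              rw [hl₂, List.filter_filter]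
        _ = l.filter (fun x => decide (x ≠ mins) && decide (x ≠ maxs)) := by
              rw [pv_filter_erase (by simp) l]
  | case2 l h =>
    exact absurd hm ((PySem.List.remove?_eq_none_iff _ _).mp h)

theorem mean1_eq_alt (nums : List Int) : mean1 nums = mean1_alt nums := by
  match hmin : PySem.List.min? nums (fun x => x), hmax : PySem.List.max? nums (fun x => x) with
  | some mins, some maxs =>
    have hmem : mins ∈ nums := PySem.List.min?_mem hmin
    have hlo : ∀ y ∈ nums, mins ≤ y := by
      intro y hy; simpa using PySem.List.min?_isMin hmin y hy
    have hhi : ∀ y ∈ nums, y ≤ maxs := by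
      intro y hy; simpa using PySem.List.max?_isMax hmax y hy
    have hfilt : nums.filter (fun x => decide (x ≠ mins) && decide (x ≠ maxs))
        = nums.filter (fun x => decide (mins < x) && decide (x < maxs)) := by
      apply List.filter_congr
      intro x hx
      have h1 := hlo x hx
      have h2 := hhi x hx
      by_cases e1 : x = mins <;> by_cases e2 : x = maxs <;>
        simp [e1, e2] <;> omega
    simp only [mean1, mean1_alt, hmin, hmax, pvOuter_eq mins maxs nums hmem, hfilt]
  | none, _ =>
    have : nums = [] := (PySem.List.min?_eq_none_iff _ _).mp hmin
    subst this
    rfl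
  | some _, none =>
    have : nums = [] := (PySem.List.max?_eq_none_iff _ _).mp hmax
    subst this
    have h0 : PySem.List.min? ([] : List Int) (fun x => x) = none :=
      (PySem.List.min?_eq_none_iff _ _).mpr rfl
    cases h0.symm.trans hmin

-- ===== VERDICT (by name: the statement is the Claim_ definition above) =====
theorem mean1_spec : Claim_equal_mean1 := by
  intro nums _ _
  exact mean1_eq_alt nums
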